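-- pv_equiv track=rewrite | github.com/arsenijj/Cryptography | lab4/lab4.py | get_parent_elements
-- ===== SOURCE A (Python) =====
-- def gcd(a, b):
--     while b != 0:
--         a, b = b, a % b
--     return a
--
-- def coprime(a, b):
--     return gcd(a, b) == 1
--
-- def get_parent_elements(m):
--
--     counter = 1
--     res = []
--
--     for i in [i for i in range(2, m) if coprime(i, m)]:
--
--         current_counter = 1
--         elem_save = elem = i
--
--         while elem != 1:
--             elem *= elem_save
--             elem %= m
--             current_counter += 1
--
--         if current_counter == counter:
--             res.append(i)
--         elif current_counter > counter:
--             res = [i]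
--             counter = current_counter
--
--     return res, counter
-- ===== SOURCE B (Python) =====
-- def _gcd(a, b):
--     while b != 0:
--         a, b = b, a % b
--     return a
--
-- def get_parent_elements(m):
--     # Units 2..m-1; each element's order is the smallest divisor d of phi(m)
--     # with pow(i, d, m) == 1 (Euler/Lagrange), found with fast modular pow.
--     units = [i for i in range(2, m) if _gcd(i, m) == 1]
--     if not units:
--         return [], 1
--     phi = len(units) + 1  # totient(m): the units are {1} plus `units`
--     divs = [d for d in range(1, phi + 1) if phi % d == 0]
--     orders = [next(d for d in divs if pow(i, d, m) == 1) for i in units]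
--     counter = max(orders)
--     return [i for i, o in zip(units, orders) if o == counter], counter
-- ===== Notes on version B (the rewrite author's own statement) =====
-- stated objective: faster
-- what changed: Instead of computing each unit's order by repeated multiplication (up to order(i) steps per unit), B counts the units once to get phi(m), enumerates the divisors of phi(m), and finds each unit's order as the smallest divisor d with pow(i,d,m)==1 via fast modular exponentiation, then takes the maximum and filters.
import Mathlib
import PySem

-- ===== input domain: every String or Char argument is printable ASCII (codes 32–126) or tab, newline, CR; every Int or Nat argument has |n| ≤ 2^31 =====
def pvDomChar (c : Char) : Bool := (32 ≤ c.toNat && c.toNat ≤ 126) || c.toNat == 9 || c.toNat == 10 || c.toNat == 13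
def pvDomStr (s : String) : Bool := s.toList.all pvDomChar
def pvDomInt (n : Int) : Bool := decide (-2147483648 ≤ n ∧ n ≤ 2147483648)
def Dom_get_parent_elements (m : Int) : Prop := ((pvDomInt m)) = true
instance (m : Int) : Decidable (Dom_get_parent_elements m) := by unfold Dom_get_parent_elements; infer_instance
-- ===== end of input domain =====

-- B replaces A's per-unit repeated-multiplication order search by: count units once to get
-- phi(m), list the divisors of phi(m), and take each unit's order as the first divisor d with
-- pow(i,d,m)==1 via fast modular exponentiation (objective: faster, measured).

-- ===== PORT A =====
-- Python's `while b != 0: a, b = b, a % b` terminates since |a % b| < |b|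
theorem pvModAbsLt (a b : Int) (h : b ≠ 0) : (PySem.Int.mod a b).natAbs < b.natAbs := by
  rcases lt_or_gt_of_ne h with hb | hb
  · have := PySem.Int.mod_neg_bounds a hb; omega
  · have h1 := PySem.Int.mod_nonneg a hb; have h2 := PySem.Int.mod_lt a hb; omega

def pyGcdA (a b : Int) : Int :=
  if h : b = 0 then a else pyGcdA b (PySem.Int.mod a b)
termination_by b.natAbs
decreasing_by exact pvModAbsLt a b h

-- the `while elem != 1` loop; fuel m.toNat (proved sufficient: the loop runs order(i)-1 < m times)
def pvOrderLoopA (m i : Int) : Nat → Int → Int → Int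
  | 0, _, c => c
  | f + 1, elem, c =>
      if elem = 1 then c
      else pvOrderLoopA m i f (PySem.Int.mod (elem * i) m) (c + 1)

def get_parent_elements (m : Int) : List Int × Int :=
  ((PySem.List.pyRange 2 m 1).filter (fun i => pyGcdA i m == 1)).foldl
    (fun st i =>
      let cc := pvOrderLoopA m i m.toNat i 1
      if cc = st.2 then (st.1 ++ [i], st.2)
      else if cc > st.2 then ([i], cc)
      else st)
    ([], 1)

-- ===== PORT B =====
def pyGcdB (a b : Int) : Int :=
  if h : b = 0 then a else pyGcdB b (PySem.Int.mod a b)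
termination_by b.natAbs
decreasing_by exact pvModAbsLt a b h

def get_parent_elements_alt (m : Int) : List Int × Int :=
  let units := (PySem.List.pyRange 2 m 1).filter (fun i => pyGcdB i m == 1)
  if units = [] then ([], 1)
  else
    let phi : Int := units.length + 1
    let divs := (PySem.List.pyRange 1 (phi + 1) 1).filter (fun d => PySem.Int.mod phi d == 0)
    -- `next(d for d in divs if pow(i,d,m)==1)`; the default 1 is unreachable (Python would raise StopIteration)
    let orders := units.map (fun i => ((divs.find? (fun d => PySem.Int.powMod i d.toNat m == 1)).getD 1))
    -- max(orders); orders is nonempty here, so the default 1 is unreachable (Python raises on empty)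
    let counter := (PySem.List.max? orders (fun o => o)).getD 1
    (((units.zip orders).filter (fun p => p.2 == counter)).map Prod.fst, counter)

-- ===== PRECONDITION & SPEC =====
def Spec_get_parent_elements (m : Int) (out : List Int × Int) : Prop := out = get_parent_elements_alt m
instance (m : Int) (out : List Int × Int) : Decidable (Spec_get_parent_elements m out) := by unfold Spec_get_parent_elements; infer_instance

-- ===== CLAIM (what is proved, stated in full; the proofs are below) =====
def Claim_equal_get_parent_elements : Prop := ∀ (m : Int), Dom_get_parent_elements m → Spec_get_parent_elements m (get_parent_elements m)

-- ===== LEMMAS AND PROOFS =====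

theorem pyGcdB_eq_A (a b : Int) : pyGcdB a b = pyGcdA a b := by
  induction a, b using pyGcdA.induct with
  | case1 a => rw [pyGcdB, pyGcdA]; simp
  | case2 a b h ih => rw [pyGcdB, pyGcdA]; simp only [h, dite_false]; exact ih

theorem pyGcdA_nat (a b : Nat) : pyGcdA (a : Int) (b : Int) = (Nat.gcd b a : Int) := by
  induction b using Nat.strong_induction_on generalizing a with
  | _ b ih =>
    rw [pyGcdA]
    by_cases hb : (b : Int) = 0
    · have : b = 0 := by exact_mod_cast hb
      subst this; simp
    · have hb' : b ≠ 0 := by exact_mod_cast fun h => hb (by exact_mod_cast h)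
      simp only [hb, dite_false]
      have hbpos : (0 : Int) < (b : Int) := by exact_mod_cast Nat.pos_of_ne_zero hb'
      have hmod : PySem.Int.mod (a : Int) (b : Int) = ((a % b : Nat) : Int) := by
        rw [PySem.Int.mod_eq_emod_of_pos hbpos]; exact_mod_cast rfl
      rw [hmod, ih (a % b) (Nat.mod_lt _ (Nat.pos_of_ne_zero hb')) b]
      rw [Nat.gcd_rec b a]

-- least positive k with I^k % M = 1 divides any k with I^k % M = 1 (Lagrange step)
theorem pvOrderDvd (M I o k : Nat) (hM : 2 ≤ M)
    (hoQ : I ^ o % M = 1) (ho : 0 < o)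
    (homin : ∀ j, 0 < j → j < o → I ^ j % M ≠ 1)
    (hk : I ^ k % M = 1) : o ∣ k := by
  have h1M : 1 % M = 1 := Nat.one_mod_eq_one.mpr (by omega)
  have ho' : I ^ o ≡ 1 [MOD M] := by unfold Nat.ModEq; rw [hoQ, h1M]
  have hk' : I ^ k ≡ 1 [MOD M] := by unfold Nat.ModEq; rw [hk, h1M]
  have hsplit : I ^ k = (I ^ o) ^ (k / o) * I ^ (k % o) := by
    rw [← pow_mul, ← pow_add]
    congr 1
    exact (Nat.div_add_mod k o).symm
  have hr : I ^ (k % o) ≡ 1 [MOD M] := by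
    have h2 : (I ^ o) ^ (k / o) * I ^ (k % o) ≡ 1 ^ (k / o) * I ^ (k % o) [MOD M] :=
      Nat.ModEq.mul_right _ (ho'.pow _)
    have h3 : I ^ k ≡ I ^ (k % o) [MOD M] := by
      calc I ^ k = (I ^ o) ^ (k / o) * I ^ (k % o) := hsplit
        _ ≡ 1 ^ (k / o) * I ^ (k % o) [MOD M] := h2
        _ = I ^ (k % o) := by ring
    exact h3.symm.trans hk'
  by_cases hr0 : k % o = 0
  · exact Nat.dvd_of_mod_eq_zero hr0
  · exfalso
    exact homin (k % o) (Nat.pos_of_ne_zero hr0) (Nat.mod_lt _ ho)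
      (by unfold Nat.ModEq at hr; rw [h1M] at hr; exact hr)

-- the while-loop computes the least k with i^k ≡ 1 (mod m), given enough fuel
theorem pvLoopA_spec (M I : Nat) (o : Nat) (hM : 0 < M)
    (hoQ : I ^ o % M = 1)
    (homin : ∀ j, 0 < j → j < o → I ^ j % M ≠ 1) :
    ∀ fuel j, 0 < j → j ≤ o → o ≤ j + fuel →
      pvOrderLoopA (M : Int) (I : Int) fuel (((I ^ j % M : Nat) : Int)) (j : Int) = (o : Int) := by
  intro fuel
  induction fuel with
  | zero =>
    intro j hj hjo hf
    have : j = o := by omega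
    subst this
    rfl
  | succ f ih =>
    intro j hj hjo hf
    rw [pvOrderLoopA]
    by_cases he : ((I ^ j % M : Nat) : Int) = 1
    · have hq : I ^ j % M = 1 := by exact_mod_cast he
      have hjeq : j = o := by
        by_contra hne
        exact homin j hj (by omega) hq
      rw [if_pos he]
      subst hjeq
      rfl
    · have hq : I ^ j % M ≠ 1 := fun h => he (by exact_mod_cast h)
      have hjlt : j < o := lt_of_le_of_ne hjo (fun h => hq (h ▸ hoQ))
      rw [if_neg he]
      have hMpos : (0 : Int) < (M : Int) := by exact_mod_cast hM
      have helem : PySem.Int.mod (((I ^ j % M : Nat) : Int) * (I : Int)) (M : Int)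
          = ((I ^ (j + 1) % M : Nat) : Int) := by
        rw [PySem.Int.mod_eq_emod_of_pos hMpos]
        have : ((I ^ j % M : Nat) : Int) * (I : Int) = (((I ^ j % M) * I : Nat) : Int) := by
          push_cast; ring
        rw [this]
        have : (I ^ j % M) * I % M = I ^ (j + 1) % M := by
          rw [pow_succ, Nat.mod_mul_mod]
        exact_mod_cast this
      rw [helem]
      have hc : (j : Int) + 1 = ((j + 1 : Nat) : Int) := by push_cast; ring
      rw [hc]
      exact ih (j + 1) (by omega) (by omega) (by omega)

-- first element of a strictly sorted list satisfying p, when x is a member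
theorem pvFindSorted {p : Int → Bool} {l : List Int} (hs : l.Pairwise (· < ·)) (x : Int)
    (hx : x ∈ l) (hpx : p x = true) (hmin : ∀ y ∈ l, y < x → p y = false) :
    l.find? p = some x := by
  induction l with
  | nil => cases hx
  | cons a t ih =>
    rcases List.mem_cons.mp hx with rfl | hxt
    · simp [List.find?, hpx]
    · have hax : a < x := (List.pairwise_cons.mp hs).1 x hxt
      have hpa : p a = false := hmin a (List.mem_cons_self) hax
      rw [List.find?]
      rw [hpa]
      exact ih (List.pairwise_cons.mp hs).2 hxt
        (fun y hy hylt => hmin y (List.mem_cons_of_mem a hy) hylt)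

theorem pvLeFold (g : Int → Int) : ∀ (t : List Int) (c : Int),
    c ≤ t.foldl (fun a i => max a (g i)) c := by
  intro t
  induction t with
  | nil => intro c; simp
  | cons a t ih =>
    intro c
    calc c ≤ max c (g a) := le_max_left _ _
      _ ≤ t.foldl (fun a i => max a (g i)) (max c (g a)) := ih _

theorem pvFoldA (g : Int → Int) (xs : List Int) : ∀ (res : List Int) (c : Int),
    xs.foldl (fun st i => if g i = st.2 then (st.1 ++ [i], st.2) else if g i > st.2 then ([i], g i) else st) (res, c)
    = ((if xs.foldl (fun a i => max a (g i)) c = c then res else []) ++ xs.filter (fun i => g i == xs.foldl (fun a i => max a (g i)) c),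
       xs.foldl (fun a i => max a (g i)) c) := by
  induction xs with
  | nil => intro res c; simp
  | cons a t ih =>
    intro res c
    simp only [List.foldl_cons, List.filter_cons]
    rcases lt_trichotomy (g a) c with h | h | h
    · have h1 : (g a = c) = False := eq_false (ne_of_lt h)
      have h2 : (g a > c) = False := eq_false (not_lt_of_gt h)
      have hmax : max c (g a) = c := max_eq_left h.le
      simp only [h1, h2, if_false, hmax, ih res c]
      have hKa : (g a == t.foldl (fun a i => max a (g i)) c) = false := by
        have := pvLeFold g t c
        simp only [beq_eq_false_iff_ne, ne_eq]
        omega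
      rw [hKa]
      simp
    · have h1 : (g a = c) = True := eq_true h
      have hmax : max c (g a) = c := by omega
      simp only [h1, if_true, hmax, ih (res ++ [a]) c]
      by_cases hK : t.foldl (fun a i => max a (g i)) c = c
      · have hKa : (g a == t.foldl (fun a i => max a (g i)) c) = true := by
          simp only [beq_iff_eq]; omega
        rw [if_pos hK, if_pos hK, hKa]
        simp
      · have hKa : (g a == t.foldl (fun a i => max a (g i)) c) = false := by
          simp only [beq_eq_false_iff_ne, ne_eq]; omega
        rw [if_neg hK, if_neg hK, hKa]
        simp
    · have h1 : (g a = c) = False := eq_false (by omega)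
      have h2 : (g a > c) = True := eq_true h
      have hmax : max c (g a) = g a := max_eq_right h.le
      simp only [h1, h2, if_false, if_true, hmax, ih [a] (g a)]
      have hKc : ¬ t.foldl (fun a i => max a (g i)) (g a) = c := by
        have := pvLeFold g t (g a)
        omega
      rw [if_neg hKc]
      by_cases hK : t.foldl (fun a i => max a (g i)) (g a) = g a
      · have hKa : (g a == t.foldl (fun a i => max a (g i)) (g a)) = true := by
          simp only [beq_iff_eq]; omega
        rw [if_pos hK, hKa]
        simp
      · have hKa : (g a == t.foldl (fun a i => max a (g i)) (g a)) = false := by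
          simp only [beq_eq_false_iff_ne, ne_eq]; omega
        rw [if_neg hK, hKa]
        simp

theorem pvZipFilter (g : Int → Int) (c : Int) (xs : List Int) :
    (((xs.zip (xs.map g)).filter (fun p => p.2 == c)).map Prod.fst) = xs.filter (fun i => g i == c) := by
  induction xs with
  | nil => rfl
  | cons a t ih => by_cases h : g a = c <;> simp [h, ih]

theorem pvBeqNat (x y : Nat) : (x == y) = decide (x = y) := by
  by_cases h : x = y <;> simp [h]

theorem pvTotientList (M : Nat) : Nat.totient M
    = ((List.range M).filter (fun n => Nat.gcd M n == 1)).length := by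
  simp only [pvBeqNat]
  simp [Nat.totient, Finset.filter, Finset.range, Multiset.range, Multiset.filter, Nat.Coprime]

theorem pvPhi (M : Nat) (hM : 2 ≤ M) :
    (((PySem.List.pyRange 2 (M : Int) 1).filter (fun i => pyGcdA i (M : Int) == 1)).length : Int) + 1
      = (Nat.totient M : Int) := by
  have hsub : ((M : Int) - 2).toNat = M - 2 := by omega
  have hlen : ((PySem.List.pyRange 2 (M : Int) 1).filter (fun i => pyGcdA i (M : Int) == 1)).length
      = ((List.range (M - 2)).filter (fun k => Nat.gcd M (2 + k) == 1)).length := by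
    rw [PySem.List.pyRange_one, hsub, List.filter_map, List.length_map]
    congr 1
    apply List.filter_congr
    intro k _
    have hcast : (2 : Int) + (k : Int) = ((2 + k : Nat) : Int) := by push_cast; ring
    rw [Function.comp_apply, hcast, pyGcdA_nat (2 + k) M]
    by_cases h : Nat.gcd M (2 + k) = 1
    · simp [h]
    · have h1 : (((Nat.gcd M (2 + k) : Nat) : Int) == 1) = false := by
        simp only [beq_eq_false_iff_ne, ne_eq]
        exact_mod_cast h
      have h2 : (Nat.gcd M (2 + k) == 1) = false := by rw [pvBeqNat]; simp [h]
      rw [h1, h2]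
  rw [hlen, pvTotientList M]
  have hsplit : List.range M = List.range 2 ++ (List.range (M - 2)).map (fun x => 2 + x) := by
    conv_lhs => rw [show M = 2 + (M - 2) by omega]
    exact List.range_add
  rw [hsplit, List.filter_append, List.length_append]
  have h0 : (List.range 2).filter (fun n => Nat.gcd M n == 1) = [1] := by
    have hr : List.range 2 = [0, 1] := rfl
    have hg0 : (Nat.gcd M 0 == 1) = false := by
      rw [Nat.gcd_zero_right, pvBeqNat]
      simp only [decide_eq_false_iff_not]
      omega
    have hg1 : (Nat.gcd M 1 == 1) = true := by simp
    rw [hr]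
    simp only [List.filter_cons, List.filter_nil, hg0, hg1]
    simp
  rw [h0, List.filter_map, List.length_map]
  have hcomp : ((fun n => Nat.gcd M n == 1) ∘ (fun x => 2 + x)) = (fun k => Nat.gcd M (2 + k) == 1) := rfl
  rw [hcomp]
  simp only [List.length_cons, List.length_nil]
  push_cast
  ring

-- the per-element core: B's divisor search and A's multiplication loop both compute order(i) mod M
theorem pvElem (M : Nat) (hM : 3 ≤ M) (i : Int) (h2 : 2 ≤ i) (him : i < (M : Int))
    (hcop : Nat.gcd M i.toNat = 1) :
    ((((PySem.List.pyRange 1 ((Nat.totient M : Int) + 1) 1).filter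
        (fun d => PySem.Int.mod (Nat.totient M : Int) d == 0)).find?
        (fun d => PySem.Int.powMod i d.toNat (M : Int) == 1)).getD 1)
      = pvOrderLoopA (M : Int) i M i 1
    ∧ 1 ≤ pvOrderLoopA (M : Int) i M i 1 := by
  have hi : i = (i.toNat : Int) := by omega
  set I := i.toNat with hIdef
  have hI2 : 2 ≤ I := by omega
  have hIM : I < M := by omega
  have hcop' : Nat.Coprime I M := by unfold Nat.Coprime; rw [Nat.gcd_comm]; exact hcop
  have hphi_pos : 0 < Nat.totient M := Nat.totient_pos.mpr (by omega)
  have hphi_lt : Nat.totient M < M := Nat.totient_lt M (by omega)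
  have h1M : 1 % M = 1 := Nat.one_mod_eq_one.mpr (by omega)
  have hQphi : I ^ Nat.totient M % M = 1 := by
    have h := Nat.ModEq.pow_totient hcop'
    unfold Nat.ModEq at h
    rw [h1M] at h
    exact h
  have hex : ∃ k, 0 < k ∧ I ^ k % M = 1 := ⟨Nat.totient M, hphi_pos, hQphi⟩
  obtain ⟨hopos, hoQ⟩ := Nat.find_spec hex
  set o := Nat.find hex with hodef
  have homin : ∀ j, 0 < j → j < o → I ^ j % M ≠ 1 := fun j hj hjo hq => Nat.find_min hex hjo ⟨hj, hq⟩
  have holephi : o ≤ Nat.totient M := Nat.find_min' hex ⟨hphi_pos, hQphi⟩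
  have hodvd : o ∣ Nat.totient M := pvOrderDvd M I o (Nat.totient M) (by omega) hoQ hopos homin hQphi
  have hloop : pvOrderLoopA (M : Int) i M i 1 = (o : Int) := by
    have h := pvLoopA_spec M I o (by omega) hoQ homin M 1 (by omega) (by omega) (by omega)
    rw [pow_one, Nat.mod_eq_of_lt hIM, Nat.cast_one] at h
    rw [hi]
    exact h
  have hMposI : (0 : Int) < (M : Int) := by exact_mod_cast (by omega : 0 < M)
  have hpred : ∀ (d : Int), 1 ≤ d →
      ((PySem.Int.powMod i d.toNat (M : Int) == 1) = true ↔ I ^ d.toNat % M = 1) := by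
    intro d _
    rw [PySem.Int.powMod_eq, PySem.Int.mod_eq_emod_of_pos hMposI, hi]
    have hc : ((I : Int)) ^ d.toNat % (M : Int) = ((I ^ d.toNat % M : Nat) : Int) := by
      push_cast
      rfl
    rw [hc]
    simp only [beq_iff_eq]
    exact_mod_cast Iff.rfl
  have hsorted : ((PySem.List.pyRange 1 ((Nat.totient M : Int) + 1) 1).filter
      (fun d => PySem.Int.mod (Nat.totient M : Int) d == 0)).Pairwise (· < ·) :=
    (PySem.List.pairwise_lt_pyRange_one 1 ((Nat.totient M : Int) + 1)).filter _
  have hmem : (o : Int) ∈ (PySem.List.pyRange 1 ((Nat.totient M : Int) + 1) 1).filter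
      (fun d => PySem.Int.mod (Nat.totient M : Int) d == 0) := by
    rw [List.mem_filter]
    refine ⟨PySem.List.mem_pyRange_one.mpr ⟨by exact_mod_cast hopos, by exact_mod_cast Nat.lt_succ_of_le holephi⟩, ?_⟩
    simp only [beq_iff_eq, PySem.Int.mod_eq_zero_iff_dvd]
    exact_mod_cast hodvd
  have hpo : (PySem.Int.powMod i ((o : Int)).toNat (M : Int) == 1) = true := by
    apply (hpred (o : Int) (by exact_mod_cast hopos)).mpr
    rw [Int.toNat_natCast]
    exact hoQ
  have hminl : ∀ y ∈ (PySem.List.pyRange 1 ((Nat.totient M : Int) + 1) 1).filter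
      (fun d => PySem.Int.mod (Nat.totient M : Int) d == 0), y < (o : Int) →
      (PySem.Int.powMod i y.toNat (M : Int) == 1) = false := by
    intro y hy hylt
    have hy1 : 1 ≤ y := (PySem.List.mem_pyRange_one.mp (List.mem_filter.mp hy).1).1
    rw [Bool.eq_false_iff]
    intro hb
    have hq := (hpred y hy1).mp hb
    exact homin y.toNat (by omega) (by omega) hq
  have hfind := pvFindSorted hsorted (o : Int) hmem hpo hminl
  rw [hfind, hloop]
  exact ⟨rfl, by exact_mod_cast hopos⟩

-- ===== VERDICT (by name: the statement is the Claim_ definition above) =====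
theorem get_parent_elements_spec : Claim_equal_get_parent_elements := by
  intro m _
  unfold Spec_get_parent_elements get_parent_elements get_parent_elements_alt
  simp only [pyGcdB_eq_A]
  by_cases hne : (PySem.List.pyRange 2 m 1).filter (fun i => pyGcdA i m == 1) = []
  · rw [hne]
    simp
  · obtain ⟨u, t, hut⟩ : ∃ u t, (PySem.List.pyRange 2 m 1).filter (fun i => pyGcdA i m == 1) = u :: t := by
      cases h : (PySem.List.pyRange 2 m 1).filter (fun i => pyGcdA i m == 1) with
      | nil => exact absurd h hne
      | cons u t => exact ⟨u, t, rfl⟩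
    have hu_mem : u ∈ (PySem.List.pyRange 2 m 1).filter (fun i => pyGcdA i m == 1) := by
      rw [hut]; exact List.mem_cons_self
    have hu_range := PySem.List.mem_pyRange_one.mp (List.mem_filter.mp hu_mem).1
    have hm3 : 3 ≤ m := by omega
    have hm : m = (m.toNat : Int) := by omega
    set M := m.toNat with hMdef
    have hM3 : 3 ≤ M := by omega
    rw [hm] at hut hu_mem ⊢
    have hmemfact : ∀ i ∈ (PySem.List.pyRange 2 (M : Int) 1).filter (fun i => pyGcdA i (M : Int) == 1),
        2 ≤ i ∧ i < (M : Int) ∧ Nat.gcd M i.toNat = 1 := by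
      intro i hi
      have h1 := PySem.List.mem_pyRange_one.mp (List.mem_filter.mp hi).1
      have h2 := (List.mem_filter.mp hi).2
      have hi0 : i = (i.toNat : Int) := by omega
      rw [hi0, pyGcdA_nat i.toNat M] at h2
      simp only [beq_iff_eq] at h2
      exact ⟨h1.1, h1.2, by exact_mod_cast h2⟩
    rw [if_neg (by rw [hut]; simp)]
    rw [pvPhi M (by omega)]
    have hmap : (List.filter (fun i => pyGcdA i (M : Int) == 1) (PySem.List.pyRange 2 (M : Int) 1)).map
        (fun i => ((((PySem.List.pyRange 1 ((Nat.totient M : Int) + 1) 1).filter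
          (fun d => PySem.Int.mod (Nat.totient M : Int) d == 0)).find?
          (fun d => PySem.Int.powMod i d.toNat (M : Int) == 1)).getD 1))
        = (List.filter (fun i => pyGcdA i (M : Int) == 1) (PySem.List.pyRange 2 (M : Int) 1)).map
        (fun i => pvOrderLoopA (M : Int) i M i 1) := by
      apply List.map_congr_left
      intro i hi
      obtain ⟨ha, hb, hc⟩ := hmemfact i hi
      exact (pvElem M hM3 i ha hb hc).1
    rw [hmap]
    rw [hut]
    rw [List.map_cons, PySem.List.max?_id_cons, Option.getD_some]
    obtain ⟨hau, hbu, hcu⟩ := hmemfact u hu_mem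
    have hgu1 : 1 ≤ pvOrderLoopA (M : Int) u M u 1 := (pvElem M hM3 u hau hbu hcu).2
    have hA := pvFoldA (fun i => pvOrderLoopA (M : Int) i M i 1) (u :: t) [] 1
    beta_reduce at hA
    rw [hA]
    have hB := pvZipFilter (fun i => pvOrderLoopA (M : Int) i M i 1)
      ((List.map (fun i => pvOrderLoopA (M : Int) i M i 1) t).foldl max (pvOrderLoopA (M : Int) u M u 1)) (u :: t)
    rw [List.map_cons] at hB
    rw [hB]
    have hK : List.foldl (fun a i => max a (pvOrderLoopA (M : Int) i M i 1)) 1 (u :: t)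
        = List.foldl max (pvOrderLoopA (M : Int) u M u 1) (List.map (fun i => pvOrderLoopA (M : Int) i M i 1) t) := by
      rw [List.foldl_cons, List.foldl_map]
      rw [max_eq_right hgu1]
    rw [hK, ite_self, List.nil_append]
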